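-- pv_equiv track=rewrite | github.com/signebedi/gptty | gptty/tagging.py | get_tag_from_text
-- ===== SOURCE A (Python) =====
-- def get_tag_from_text(user_input, replacement_string='-'):
--
--     """
--     This function takes a user input and returns the first tag found within square brackets along with the remaining text after the tag. The square brackets are removed from the tag and any spaces within the tag are replaced with the provided replacement string. If no tag is found, an empty string is returned as the tag.
--
--     Parameters:
--
--         user_input (str): The input string to search for a tag.
--         replacement_string (str): The string to replace any spaces within the tag. Defaults to '-' if no replacement string is provided.
--
--     Returns:
--
--         Tuple: A tuple containing the tag (str) and the remaining text after the tag (str). If no tag is found, the tag will be an empty string.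
--     """
--
--     tag = None
--     remaining_text = user_input.strip()
--
--     while tag is None and remaining_text != "":
--         first_word = remaining_text.lstrip().split()[0]
--
--         if first_word.startswith('['):
--             closing_bracket_pos = remaining_text.find(']')
--             if closing_bracket_pos != -1:
--                 tag = remaining_text[1:closing_bracket_pos].replace(" ", replacement_string)
--                 remaining_text = remaining_text[closing_bracket_pos + 1:].strip()
--             else:
--                 tag = ''
--                 remaining_text = user_input.strip()
--                 break
--         else:
--             tag = None
--             break
--
--     if tag is not None:
--         return tag, remaining_text
--     else:
--         return '', remaining_text
-- ===== SOURCE B (Python) =====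
-- def get_tag_from_text(user_input, replacement_string='-'):
--     s = user_input.strip()
--     if not s or s[0] != '[':
--         return '', s
--     pieces = []
--     for i in range(1, len(s)):
--         ch = s[i]
--         if ch == ']':
--             return ''.join(pieces), s[i + 1:].strip()
--         pieces.append(replacement_string if ch == ' ' else ch)
--     return '', s
-- ===== Notes on version B (the rewrite author's own statement) =====
-- stated objective: alternative
-- what changed: Replaces A's staged find/slice/str.replace pipeline (and its while-loop with an Optional tag sentinel and lstrip+split first-word test) by a single forward character scan with an accumulator: one index loop over the stripped string that builds the tag piece by piece (substituting the replacement string for spaces on the fly) and returns as soon as the closing bracket is seen.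
import Mathlib
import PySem

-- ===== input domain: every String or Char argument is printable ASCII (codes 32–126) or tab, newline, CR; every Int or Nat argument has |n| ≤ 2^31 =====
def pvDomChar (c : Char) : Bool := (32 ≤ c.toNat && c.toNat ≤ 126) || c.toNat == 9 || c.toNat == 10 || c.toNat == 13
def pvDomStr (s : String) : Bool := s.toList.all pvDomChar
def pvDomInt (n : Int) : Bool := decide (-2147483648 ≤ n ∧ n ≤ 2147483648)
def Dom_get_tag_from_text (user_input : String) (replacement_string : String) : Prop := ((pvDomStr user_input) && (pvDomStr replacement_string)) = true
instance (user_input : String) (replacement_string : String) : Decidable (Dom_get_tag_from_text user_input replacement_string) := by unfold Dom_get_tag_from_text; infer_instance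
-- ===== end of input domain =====

-- B replaces A's staged find/slice/replace pipeline by a single forward character scan with an
-- accumulator that builds the tag on the fly (objective: alternative; same linear cost).

-- ===== PORT A =====
def get_tag_from_text (user_input : String) (replacement_string : String) : String × String :=
  -- tag = None
  -- remaining_text = user_input.strip()
  let remaining_text := PySem.Str.strip user_input
  -- while tag is None and remaining_text != "": every branch of the body either assigns tag a
  -- non-None value or breaks, so the body runs at most once; transliterated as one conditional
  let (tag, remaining_text) : Option String × String :=
    if remaining_text ≠ "" then
      -- first_word = remaining_text.lstrip().split()[0]
      match PySem.List.pyGet? (PySem.Str.split₀ (PySem.Str.lstrip remaining_text)) 0 with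
      | none => (none, remaining_text)  -- unreachable (Python IndexError): a nonempty stripped string has a first word
      | some first_word =>
        if PySem.Str.startswith first_word "[" then
          let closing_bracket_pos := PySem.Str.find remaining_text "]"
          if closing_bracket_pos ≠ -1 then
            (some (PySem.Str.replace (PySem.Str.slice remaining_text (some 1) (some closing_bracket_pos)) " " replacement_string),
             PySem.Str.strip (PySem.Str.slice remaining_text (some (closing_bracket_pos + 1)) none))
          else
            (some "", PySem.Str.strip user_input)  -- tag = ''; remaining_text = user_input.strip(); break
        else
          (none, remaining_text)  -- tag = None; break
    else (none, remaining_text)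
  match tag with
  | some t => (t, remaining_text)
  | none => ("", remaining_text)

-- ===== PORT B =====
-- the for-i-in-range(1, len(s)) loop of Source B as structural recursion over the characters after
-- the opening bracket; 'acc' is the joined 'pieces' list, kept reversed
def pvScanTag (rep : List Char) : List Char → List Char → Option (List Char × List Char)
  | [], _ => none
  | c :: rest, acc =>
    if c = ']' then some (acc.reverse, rest)
    else pvScanTag rep rest (if c = ' ' then rep.reverse ++ acc else c :: acc)

def get_tag_from_text_alt (user_input : String) (replacement_string : String) : String × String :=
  let s := PySem.Chars.strip user_input.toList
  match s with
  | [] => ("", "")                       -- 'not s' branch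
  | c :: rest =>
    if c ≠ '[' then ("", String.ofList (c :: rest))   -- 's[0] != "["' branch
    else
      match pvScanTag replacement_string.toList rest [] with
      | some (tag, rem) => (String.ofList tag, String.ofList (PySem.Chars.strip rem))
      | none => ("", String.ofList (c :: rest))

-- ===== PRECONDITION & SPEC =====
def Spec_get_tag_from_text (user_input : String) (replacement_string : String) (out : String × String) : Prop := out = get_tag_from_text_alt user_input replacement_string
instance (user_input : String) (replacement_string : String) (out : String × String) : Decidable (Spec_get_tag_from_text user_input replacement_string out) := by unfold Spec_get_tag_from_text; infer_instance

-- ===== CLAIM =====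
def Claim_equal_get_tag_from_text : Prop := ∀ (user_input : String) (replacement_string : String), Dom_get_tag_from_text user_input replacement_string → Spec_get_tag_from_text user_input replacement_string (get_tag_from_text user_input replacement_string)

-- ===== LEMMAS AND PROOFS =====

-- the space-substitution both programs perform on the tag characters
def pvSubst (rep : List Char) (l : List Char) : List Char :=
  l.flatMap (fun c => if c = ' ' then rep else [c])

-- split₀.go prepends the reversed accumulator to the words it still produces
lemma split0_go_acc (s : List Char) (cur : List Char) (acc : List (List Char)) :
    PySem.Chars.split₀.go s cur acc = acc.reverse ++ PySem.Chars.split₀.go s cur [] := by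
  induction s generalizing cur acc with
  | nil =>
    simp only [PySem.Chars.split₀.go]
    split_ifs <;> simp
  | cons c rest ih =>
    simp only [PySem.Chars.split₀.go]
    split_ifs with h1 h2
    · exact ih [] acc
    · rw [ih [] (cur.reverse :: acc), ih [] [cur.reverse]]; simp
    · exact ih (c :: cur) acc

-- with a nonempty current word, the first word split₀.go produces extends cur.reverse
lemma split0_go_head (s : List Char) (cur : List Char) (h : cur ≠ []) :
    ∃ t ws, PySem.Chars.split₀.go s cur [] = (cur.reverse ++ t) :: ws := by
  induction s generalizing cur with
  | nil =>
    refine ⟨[], [], ?_⟩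
    simp only [PySem.Chars.split₀.go]
    simp [List.isEmpty_iff, h]
  | cons c rest ih =>
    simp only [PySem.Chars.split₀.go]
    split_ifs with h1 h2
    · exact absurd (List.isEmpty_iff.mp h2) h
    · refine ⟨[], PySem.Chars.split₀.go rest [] [], ?_⟩
      rw [split0_go_acc]; simp
    · obtain ⟨t, ws, ht⟩ := ih (c :: cur) (by simp)
      exact ⟨c :: t, ws, by simpa using ht⟩

-- rstrip keeps a prefix of its argument
lemma rstrip_prefix (l : List Char) : PySem.Chars.rstrip l <+: l := by
  unfold PySem.Chars.rstrip
  obtain ⟨t, ht⟩ := List.dropWhile_suffix (p := PySem.Chars.isspace) (l := l.reverse)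
  exact ⟨t.reverse, by rw [← List.reverse_append, ht, List.reverse_reverse]⟩

-- a nonempty stripped string starts with a non-space character
lemma strip_head_not_space (l : List Char) (c : Char) (cs : List Char)
    (h : PySem.Chars.strip l = c :: cs) : PySem.Chars.isspace c = false := by
  unfold PySem.Chars.strip at h
  obtain ⟨t, ht⟩ := rstrip_prefix (PySem.Chars.lstrip l)
  rw [h] at ht
  unfold PySem.Chars.lstrip at ht
  have hne : List.dropWhile PySem.Chars.isspace l ≠ [] := by rw [← ht]; simp
  have hh := List.head_dropWhile_not PySem.Chars.isspace hne
  rw [show (List.dropWhile PySem.Chars.isspace l).head hne = c from by simp [← ht]] at hh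
  exact hh

-- lstrip is the identity on an already-stripped string
lemma lstrip_strip (l : List Char) :
    PySem.Chars.lstrip (PySem.Chars.strip l) = PySem.Chars.strip l := by
  cases h : PySem.Chars.strip l with
  | nil => simp [PySem.Chars.lstrip]
  | cons c cs =>
    have := strip_head_not_space l c cs h
    simp [PySem.Chars.lstrip, this]

lemma singleton_prefix_cons_iff (c d : Char) (rest : List Char) :
    ([d] <+: (c :: rest)) ↔ c = d := by
  constructor
  · intro h; obtain ⟨t, ht⟩ := h
    exact (List.cons.injEq _ _ _ _ ▸ ht).1.symm
  · rintro rfl; exact ⟨rest, rfl⟩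

-- startswith against a one-character pattern only looks at the head
lemma startswith_cons_singleton (c d : Char) (rest : List Char) :
    PySem.Chars.startswith (c :: rest) [d] = (c == d) := by
  by_cases hcd : c = d
  · simp only [hcd, beq_self_eq_true]
    exact (PySem.Chars.startswith_iff _ _).mpr ((singleton_prefix_cons_iff d d rest).mpr rfl)
  · have h2 : (c == d) = false := by simpa using hcd
    rw [h2, Bool.eq_false_iff]
    intro hc
    exact hcd ((singleton_prefix_cons_iff c d rest).mp ((PySem.Chars.startswith_iff _ _).mp hc))

-- replace with the one-character pattern ' ' is the character-wise substitution
lemma replace_go_space (rep : List Char) (fuel : Nat) (l : List Char) (acc : List Char)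
    (hf : l.length ≤ fuel) :
    PySem.Chars.replace.go [' '] rep fuel l acc = acc.reverse ++ pvSubst rep l := by
  induction fuel generalizing l acc with
  | zero =>
    have : l = [] := List.length_eq_zero_iff.mp (Nat.le_zero.mp hf)
    subst this; simp [PySem.Chars.replace.go, pvSubst]
  | succ n ih =>
    cases l with
    | nil => simp [PySem.Chars.replace.go, pvSubst]
    | cons c t =>
      simp only [PySem.Chars.replace.go]
      by_cases hc : c = ' '
      · subst hc
        have hpre : [' '].isPrefixOf (' ' :: t) = true := by simp [List.isPrefixOf]
        rw [if_pos hpre]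
        simp only [List.length_cons] at hf
        rw [ih _ _ (by simpa using Nat.le_of_succ_le_succ hf)]
        simp [pvSubst]
      · have hpre : [' '].isPrefixOf (c :: t) = false := by
          simp [List.isPrefixOf]; intro h; exact absurd h.symm hc
        rw [if_neg (by simp [hpre])]
        simp only [List.length_cons] at hf
        rw [ih _ _ (Nat.le_of_succ_le_succ hf)]
        simp [pvSubst, hc]

lemma replace_space (rep : List Char) (l : List Char) :
    PySem.Chars.replace l [' '] rep = pvSubst rep l := by
  unfold PySem.Chars.replace
  rw [if_neg (by simp)]
  simpa using replace_go_space rep l.length l [] le_rfl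

-- find.go on a list with no ']' returns -1
lemma find_go_not_mem (l : List Char) (k : Nat) (h : ']' ∉ l) :
    PySem.Chars.find.go [']'] l k = -1 := by
  induction l generalizing k with
  | nil => simp [PySem.Chars.find.go]
  | cons c t ih =>
    simp only [PySem.Chars.find.go]
    have hc : c ≠ ']' := fun hc => h (by simp [hc])
    rw [if_neg (by simp [List.isPrefixOf]; intro h'; exact absurd h'.symm hc)]
    exact ih (k + 1) (fun hm => h (List.mem_cons_of_mem _ hm))

-- find.go on pre ++ ']' :: post with no ']' in pre points at the bracket
lemma find_go_mem (pre post : List Char) (k : Nat) (h : ']' ∉ pre) :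
    PySem.Chars.find.go [']'] (pre ++ ']' :: post) k = (k : Int) + pre.length := by
  induction pre generalizing k with
  | nil => simp [PySem.Chars.find.go, List.isPrefixOf]
  | cons c t ih =>
    simp only [List.cons_append, PySem.Chars.find.go]
    have hc : c ≠ ']' := fun hc => h (by simp [hc])
    rw [if_neg (by simp [List.isPrefixOf]; intro h'; exact absurd h'.symm hc)]
    rw [ih (k + 1) (fun hm => h (List.mem_cons_of_mem _ hm))]
    push_cast [List.length_cons]; ring

-- the scan finds nothing when there is no closing bracket
lemma scanTag_not_mem (rep : List Char) (l : List Char) (acc : List Char) (h : ']' ∉ l) :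
    pvScanTag rep l acc = none := by
  induction l generalizing acc with
  | nil => simp [pvScanTag]
  | cons c t ih =>
    have hc : c ≠ ']' := fun hc => h (by simp [hc])
    simp only [pvScanTag, if_neg hc]
    exact ih _ (fun hm => h (List.mem_cons_of_mem _ hm))

-- the scan substitutes spaces up to the first closing bracket and returns the rest
lemma scanTag_mem (rep : List Char) (pre post : List Char) (acc : List Char) (h : ']' ∉ pre) :
    pvScanTag rep (pre ++ ']' :: post) acc = some (acc.reverse ++ pvSubst rep pre, post) := by
  induction pre generalizing acc with
  | nil => simp [pvScanTag, pvSubst]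
  | cons c t ih =>
    have hc : c ≠ ']' := fun hc => h (by simp [hc])
    simp only [List.cons_append, pvScanTag, if_neg hc]
    rw [ih _ (fun hm => h (List.mem_cons_of_mem _ hm))]
    by_cases hsp : c = ' ' <;> simp [hsp, pvSubst]

-- split a list at the first occurrence of an element
lemma first_mem_split {α : Type} [DecidableEq α] (a : α) (l : List α) (h : a ∈ l) :
    ∃ pre post, l = pre ++ a :: post ∧ a ∉ pre := by
  induction l with
  | nil => cases h
  | cons b t ih =>
    by_cases hb : b = a
    · exact ⟨[], t, by simp [hb], by simp⟩
    · have ht : a ∈ t := by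
        rcases List.mem_cons.mp h with h1 | h1
        · exact absurd h1.symm hb
        · exact h1
      obtain ⟨p, q, h1, h2⟩ := ih ht
      refine ⟨b :: p, q, by simp [h1], ?_⟩
      intro hm
      rcases List.mem_cons.mp hm with h3 | h3
      · exact hb h3.symm
      · exact h2 h3

lemma main_eq (u r : String) : get_tag_from_text u r = get_tag_from_text_alt u r := by
  unfold get_tag_from_text get_tag_from_text_alt
  by_cases hs : PySem.Str.strip u = ""
  · have : PySem.Chars.strip u.toList = [] := by
      have := congrArg String.toList hs
      rwa [PySem.Str.toList_strip] at this
    rw [hs, this]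
    rfl
  · obtain ⟨c, cs, hcs⟩ : ∃ c cs, (PySem.Str.strip u).toList = c :: cs := by
      cases h : (PySem.Str.strip u).toList with
      | nil => exact absurd (String.toList_inj.mp h) hs
      | cons a l => exact ⟨a, l, rfl⟩
    have hcss : (PySem.Str.strip u).toList = PySem.Chars.strip u.toList := PySem.Str.toList_strip u
    have hchars : PySem.Chars.strip u.toList = c :: cs := by rw [← hcss, hcs]
    have hlstrip : PySem.Str.lstrip (PySem.Str.strip u) = PySem.Str.strip u := by
      apply String.toList_inj.mp
      rw [PySem.Str.toList_lstrip, hcss, lstrip_strip]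
    have hcspace : PySem.Chars.isspace c = false :=
      strip_head_not_space u.toList c cs (by rw [← hcss, hcs])
    obtain ⟨t, ws, hgo⟩ := split0_go_head cs [c] (by simp)
    have hsplit : PySem.Chars.split₀ (PySem.Str.strip u).toList = (c :: t) :: ws := by
      rw [hcs]
      show PySem.Chars.split₀.go (c :: cs) [] [] = _
      simp only [PySem.Chars.split₀.go, hcspace]
      simpa using hgo
    have hsplitS : PySem.Str.split₀ (PySem.Str.strip u) = String.ofList (c :: t) :: ws.map String.ofList := by
      unfold PySem.Str.split₀
      rw [hsplit]; rfl
    have hget : PySem.List.pyGet? (PySem.Str.split₀ (PySem.Str.lstrip (PySem.Str.strip u))) 0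
        = some (String.ofList (c :: t)) := by
      rw [hlstrip, hsplitS]
      simp [PySem.List.pyGet?, PySem.List.pyIdx?]
    have hsw : PySem.Str.startswith (String.ofList (c :: t)) "[" = (c == '[') := by
      rw [PySem.Str.startswith_eq]
      have : (String.ofList (c :: t)).toList = c :: t := by simp
      rw [this]
      exact startswith_cons_singleton c '[' t
    simp only [hs, ne_eq, not_false_iff, if_pos, hget, hsw]
    by_cases hc : c = '['
    · subst hc
      rw [hchars]
      simp only [beq_self_eq_true, if_true, not_true, if_false]
      by_cases hmem : ']' ∈ cs
      · obtain ⟨pre, post, hdec, hpre⟩ := first_mem_split ']' cs hmem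
        subst hdec
        have hfind : PySem.Str.find (PySem.Str.strip u) "]" = (1 : Int) + pre.length := by
          rw [PySem.Str.find_eq, hcs]
          show PySem.Chars.find ('[' :: (pre ++ ']' :: post)) [']'] = _
          unfold PySem.Chars.find
          simp only [PySem.Chars.find.go]
          rw [if_neg (by simp [List.isPrefixOf])]
          exact find_go_mem pre post 1 hpre
        rw [hfind, if_pos (show ¬((1 : Int) + pre.length = -1) by intro h; omega),
            scanTag_mem r.toList pre post [] hpre]
        dsimp only
        simp only [List.reverse_nil, List.nil_append]
        rw [Prod.mk.injEq]
        constructor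
        · -- tag equality
          apply String.toList_inj.mp
          rw [PySem.Str.toList_replace]
          have hsl : (PySem.Str.slice (PySem.Str.strip u) (some 1) (some ((1 : Int) + pre.length))).toList = pre := by
            rw [PySem.Str.toList_slice, PySem.Chars.slice_eq_listSlice, hcs]
            have h2 : ((1 : Int) + pre.length) = ((1 + pre.length : Nat) : Int) := by push_cast; ring
            rw [h2, show ((1 : Int)) = ((1 : Nat) : Int) from rfl, PySem.List.slice_natCast]
            simp only [List.drop_one, List.tail_cons, Nat.add_sub_cancel_left]
            rw [show pre.length = (pre ++ ']' :: post).length ⊓ pre.length from by simp, ← List.take_take,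
                List.take_left', List.take_of_length_le (by simp)]
            rfl
          rw [hsl, show (" " : String).toList = [' '] from rfl, replace_space]
          simp
        · -- remaining text equality
          apply String.toList_inj.mp
          rw [PySem.Str.toList_strip, PySem.Str.toList_slice, PySem.Chars.slice_eq_listSlice, hcs]
          have h2 : ((1 : Int) + pre.length + 1) = ((pre.length + 2 : Nat) : Int) := by push_cast; ring
          rw [h2, PySem.List.slice_from_natCast]
          have hdrop : List.drop (pre.length + 2) ('[' :: (pre ++ ']' :: post)) = post := by
            rw [show pre.length + 2 = (pre.length + 1) + 1 from rfl, List.drop_succ_cons,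
                show pre.length + 1 = pre.length + 1 from rfl,
                List.drop_length_add_append (l₁ := pre) (l₂ := ']' :: post) 1, List.drop_one, List.tail_cons]
          rw [hdrop]
          simp
      · have hfind : PySem.Str.find (PySem.Str.strip u) "]" = -1 := by
          rw [PySem.Str.find_eq, hcs]
          show PySem.Chars.find ('[' :: cs) [']'] = -1
          unfold PySem.Chars.find
          simp only [PySem.Chars.find.go]
          rw [if_neg (by simp [List.isPrefixOf])]
          exact find_go_not_mem cs 1 hmem
        rw [hfind, if_neg (by simp), scanTag_not_mem r.toList cs [] hmem]
        dsimp only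
        rw [Prod.mk.injEq]
        exact ⟨rfl, by rw [← hcs, String.ofList_toList]⟩
    · have hcb : (c == '[') = false := by simpa using hc
      rw [hchars, hcb]
      simp only [Bool.false_eq_true, if_false]
      rw [if_pos hc, Prod.mk.injEq]
      exact ⟨rfl, by rw [← hcs, String.ofList_toList]⟩
-- ===== VERDICT =====
theorem get_tag_from_text_spec : Claim_equal_get_tag_from_text := by
  intro u r _
  exact main_eq u r
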